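-- pv_equiv track=rewrite | github.com/yeyingsrc/UploadRanger | gui/intruder_widget.py | _get_payload_positions
-- ===== SOURCE A (Python) =====
-- from typing import List, Dict, Tuple
--
-- def _get_payload_positions(url: str, headers: dict, body: str) -> List[Tuple[str, int, int]]:
--     positions = []
--     marker = '$'
--
--     idx = 0
--     while True:
--         start = url.find(marker, idx)
--         if start == -1:
--             break
--         end = url.find(marker, start + 1)
--         if end == -1:
--             break
--         positions.append(('url', start, end + 1))
--         idx = end + 1
--
--     idx = 0
--     while True:
--         start = body.find(marker, idx)
--         if start == -1:
--             break
--         end = body.find(marker, start + 1)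
--         if end == -1:
--             break
--         positions.append(('body', start, end + 1))
--         idx = end + 1
--
--     return positions
-- ===== SOURCE B (Python) =====
-- def _get_payload_positions(url, headers, body):
--     positions = []
--     for tag, text in (('url', url), ('body', body)):
--         idxs = [i for i, c in enumerate(text) if c == '$']
--         it = iter(idxs)
--         positions.extend((tag, a, b + 1) for a, b in zip(it, it))
--     return positions
-- ===== Notes on version B (the rewrite author's own statement) =====
-- stated objective: simpler
-- what changed: Replaces the two greedy find-scanning while-loops with one comprehension collecting all '$' indices per text and the zip(it,it) idiom pairing consecutive indices non-overlappingly.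
import Mathlib
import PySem

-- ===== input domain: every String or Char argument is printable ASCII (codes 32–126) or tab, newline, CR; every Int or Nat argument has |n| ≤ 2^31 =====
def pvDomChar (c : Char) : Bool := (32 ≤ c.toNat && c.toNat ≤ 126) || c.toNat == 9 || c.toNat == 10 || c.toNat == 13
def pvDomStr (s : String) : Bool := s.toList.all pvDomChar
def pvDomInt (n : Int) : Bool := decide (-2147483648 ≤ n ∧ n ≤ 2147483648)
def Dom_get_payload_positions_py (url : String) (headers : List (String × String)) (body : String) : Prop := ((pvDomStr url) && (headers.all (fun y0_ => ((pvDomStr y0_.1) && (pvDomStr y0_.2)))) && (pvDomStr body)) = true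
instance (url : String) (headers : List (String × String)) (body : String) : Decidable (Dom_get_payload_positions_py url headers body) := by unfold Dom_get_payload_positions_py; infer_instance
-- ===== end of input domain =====

-- B replaces A's two greedy find-scanning while-loops by one index-collecting comprehension per
-- text followed by a non-overlapping zip(it,it) pairing pass (objective: simpler, same O(n) cost).

-- ===== PORT A =====
-- the while-loop of A: `fuel` is only a totality guard (each iteration advances idx by ≥ 2,
-- so `length + 1` iterations are never exhausted); the loop body is A's code step for step
def pvLoopA (tag : String) (s : String) (fuel : Nat) (idx : Int) : List (String × Int × Int) :=
  match fuel with
  | 0 => []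
  | fuel + 1 =>
    let start := PySem.Str.findFrom s "$" idx
    if start = -1 then []
    else
      let e := PySem.Str.findFrom s "$" (start + 1)
      if e = -1 then []
      else (tag, start, e + 1) :: pvLoopA tag s fuel (e + 1)

def get_payload_positions_py (url : String) (headers : List (String × String)) (body : String) : List (String × Int × Int) :=
  pvLoopA "url" url (url.toList.length + 1) 0 ++ pvLoopA "body" body (body.toList.length + 1) 0

-- ===== PORT B =====
-- zip(it, it) over one iterator: consecutive non-overlapping pairs
def pvPairUp : List Int → List (Int × Int)
  | a :: b :: rest => (a, b) :: pvPairUp rest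
  | _ => []

-- [i for i, c in enumerate(text) if c == '$']
def pvMarkerIdxs (s : String) : List Int :=
  ((PySem.List.enumerate s.toList).filter (fun p => p.2 == '$')).map (·.1)

def get_payload_positions_py_alt (url : String) (headers : List (String × String)) (body : String) : List (String × Int × Int) :=
  ((pvPairUp (pvMarkerIdxs url)).map (fun p => ("url", p.1, p.2 + 1)))
    ++ ((pvPairUp (pvMarkerIdxs body)).map (fun p => ("body", p.1, p.2 + 1)))

-- ===== PRECONDITION & SPEC =====
def Spec_get_payload_positions_py (url : String) (headers : List (String × String)) (body : String) (out : List (String × Int × Int)) : Prop := out = get_payload_positions_py_alt url headers body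
instance (url : String) (headers : List (String × String)) (body : String) (out : List (String × Int × Int)) : Decidable (Spec_get_payload_positions_py url headers body out) := by unfold Spec_get_payload_positions_py; infer_instance

-- ===== CLAIM (what is proved, stated in full; the proofs are below) =====
def Claim_equal_get_payload_positions_py : Prop := ∀ (url : String) (headers : List (String × String)) (body : String), Dom_get_payload_positions_py url headers body → Spec_get_payload_positions_py url headers body (get_payload_positions_py url headers body)

-- ===== LEMMAS AND PROOFS =====

-- a singleton list is a prefix iff it is the first element
theorem pv_singleton_prefix (c : Char) (l : List Char) : [c] <+: l ↔ l[0]? = some c := by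
  cases l with
  | nil => simp
  | cons b bs => simp [List.cons_prefix_cons, eq_comm]

-- B's comprehension equals List.findIdxs (cast to Int)
set_option maxRecDepth 4096 in
theorem pv_markerIdxs_eq (cs : List Char) (n : Nat) :
    ((PySem.List.enumerate cs (n : Int)).filter (fun p => p.2 == '$')).map (·.1)
      = (cs.findIdxs (· == '$') n).map (fun i => (i : Int)) := by
  induction cs generalizing n with
  | nil => simp [PySem.List.enumerate_nil]
  | cons c cs ih =>
    have h1 : ((n : Int) + 1) = ((n + 1 : Nat) : Int) := by push_cast; ring
    rw [PySem.List.enumerate_cons, List.findIdxs_cons, List.filter_cons, h1]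
    by_cases hc : (c == '$') = true
    · rw [if_pos hc, if_pos hc, List.map_cons, ih]; simp
    · rw [if_neg (by simp_all), if_neg (by simp_all), ih]

-- stepping past the head of a sorted filtered index list
theorem pv_filter_advance {N : List Nat} (hs : N.Pairwise (· < ·)) {k a : Nat} {rest : List Nat}
    (hE : N.filter (fun i => decide (k ≤ i)) = a :: rest) :
    N.filter (fun i => decide (a + 1 ≤ i)) = rest := by
  induction N with
  | nil => simp at hE
  | cons c N ih =>
    rw [List.pairwise_cons] at hs
    by_cases hkc : k ≤ c
    · simp only [List.filter_cons, decide_eq_true_eq, hkc, if_pos, List.cons.injEq] at hE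
      obtain ⟨rfl, hrest⟩ := by simpa using hE
      have hall : ∀ x ∈ N, c < x := hs.1
      have : ¬ (c + 1 ≤ c) := by omega
      simp only [List.filter_cons, decide_eq_true_eq, this, if_false]
      rw [← hrest]
      have e1 : N.filter (fun i => decide (c + 1 ≤ i)) = N :=
        List.filter_eq_self.mpr (fun x hx => by simpa using (hall x hx))
      have e2 : N.filter (fun i => decide (k ≤ i)) = N :=
        List.filter_eq_self.mpr (fun x hx => by have := hall x hx; simp; omega)
      rw [e1, e2]
    · simp only [List.filter_cons, decide_eq_true_eq, hkc, if_false] at hE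
      have ha : a ∈ N := by
        have : a ∈ N.filter (fun i => decide (k ≤ i)) := by rw [hE]; simp
        exact List.mem_of_mem_filter this
      have hca : c < a := hs.1 a ha
      have : ¬ (a + 1 ≤ c) := by omega
      simp only [List.filter_cons, decide_eq_true_eq, this, if_false]
      exact ih hs.2 hE

-- findFrom for the single marker character, characterised by the filtered index list
theorem pv_findFrom_eq (cs : List Char) (k : Nat) (hk : k ≤ cs.length) :
    PySem.Chars.findFrom cs ['$'] (k : Int) none
      = match (cs.findIdxs (· == '$')).filter (fun i => decide (k ≤ i)) with
        | [] => -1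
        | a :: _ => (a : Int) := by
  cases hL : (cs.findIdxs (· == '$')).filter (fun i => decide (k ≤ i)) with
  | nil =>
    show PySem.Chars.findFrom cs ['$'] (k : Int) none = -1
    rw [(PySem.Chars.findFrom_natCast_eq_neg_one_iff cs ['$'] k hk)]
    intro hinf
    have hmem : '$' ∈ cs.drop k := (List.singleton_infix_iff _ _).mp hinf
    obtain ⟨j, hj, hjv⟩ := List.mem_iff_getElem.mp hmem
    have hjl : k + j < cs.length := by
      have := hj; rw [List.length_drop] at this; omega
    have hN : k + j ∈ cs.findIdxs (· == '$') := by
      rw [List.mem_findIdxs_iff_pos_getElem hjl]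
      rw [List.getElem_drop] at hjv
      simp [hjv]
    have : k + j ∈ (cs.findIdxs (· == '$')).filter (fun i => decide (k ≤ i)) := by
      rw [List.mem_filter]; exact ⟨hN, by simp⟩
    rw [hL] at this; simp at this
  | cons a rest =>
    have haf : a ∈ (cs.findIdxs (· == '$')).filter (fun i => decide (k ≤ i)) := by
      rw [hL]; simp
    have haN : a ∈ cs.findIdxs (· == '$') := List.mem_of_mem_filter haf
    have hka : k ≤ a := by have := (List.mem_filter.mp haf).2; simpa using this
    have hal : a < cs.length := by
      have := List.lt_add_of_mem_findIdxs a haN; omega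
    have hav : cs[a] = '$' := by
      have := (List.mem_findIdxs_iff_pos_getElem hal).mp haN; simpa using this
    have hpre_a : ['$'] <+: cs.drop a := by
      rw [pv_singleton_prefix, List.head?_drop.symm, List.head?_drop]
      simp [List.getElem?_eq_getElem hal, hav]
    have hne : PySem.Chars.findFrom cs ['$'] (k : Int) none ≠ -1 := by
      rw [Ne, PySem.Chars.findFrom_natCast_eq_neg_one_iff cs ['$'] k hk]
      simp only [not_not]
      apply (List.singleton_infix_iff _ _).mpr
      refine List.mem_iff_getElem.mpr ⟨a - k, ?_, ?_⟩
      · rw [List.length_drop]; omega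
      · rw [List.getElem_drop]
        have : k + (a - k) = a := by omega
        simp [this, hav]
    obtain ⟨hkf, hpre, hmin⟩ := PySem.Chars.findFrom_natCast_spec cs ['$'] k hk hne
    set f := PySem.Chars.findFrom cs ['$'] (k : Int) none with hf
    have hf0 : 0 ≤ f := le_trans (by exact_mod_cast Int.natCast_nonneg k) hkf
    have hfv : cs[f.toNat]? = some '$' := by
      rw [← List.head?_drop]
      rcases hpre with ⟨t, ht⟩
      rw [← ht]; rfl
    obtain ⟨hfl, hfe⟩ := List.getElem?_eq_some_iff.mp hfv
    have hkfn : k ≤ f.toNat := by omega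
    have hfN : f.toNat ∈ cs.findIdxs (· == '$') := by
      rw [List.mem_findIdxs_iff_pos_getElem hfl]; simp [hfe]
    have hfF : f.toNat ∈ (a :: rest) := by
      rw [← hL, List.mem_filter]; exact ⟨hfN, by simp [hkfn]⟩
    have hsorted : ((cs.findIdxs (· == '$')).filter (fun i => decide (k ≤ i))).Pairwise (· < ·) :=
      (List.pairwise_findIdxs).filter _
    have haf2 : a ≤ f.toNat := by
      rw [hL, List.pairwise_cons] at hsorted
      rcases List.mem_cons.mp hfF with h | h
      · omega
      · have := hsorted.1 _ h; omega
    have : ¬ a < f.toNat := by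
      intro hlt
      exact hmin a hka hlt hpre_a
    have hfa : f.toNat = a := by omega
    show f = (a : Int)
    omega

-- the loop invariant: A's scanning loop from index k produces B's pairing of the
-- remaining marker indices
theorem pv_loop_inv (tag : String) (s : String) (fuel k : Nat)
    (hk : k ≤ s.toList.length)
    (hfuel : ((s.toList.findIdxs (· == '$')).filter (fun i => decide (k ≤ i))).length ≤ 2 * fuel + 1) :
    pvLoopA tag s fuel (k : Int)
      = (pvPairUp (((s.toList.findIdxs (· == '$')).filter (fun i => decide (k ≤ i))).map (fun i => (i : Int)))).map
          (fun p => (tag, p.1, p.2 + 1)) := by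
  induction fuel generalizing k with
  | zero =>
    cases hL : (s.toList.findIdxs (· == '$')).filter (fun i => decide (k ≤ i)) with
    | nil => simp [pvLoopA, pvPairUp]
    | cons a rest =>
      cases rest with
      | nil => simp [pvLoopA, pvPairUp]
      | cons b rest2 => rw [hL] at hfuel; simp at hfuel
  | succ fuel ih =>
    have hdollar : ("$" : String).toList = ['$'] := rfl
    have hstep : pvLoopA tag s (fuel + 1) (k : Int)
        = (if PySem.Str.findFrom s "$" (k : Int) = -1 then []
           else if PySem.Str.findFrom s "$" (PySem.Str.findFrom s "$" (k : Int) + 1) = -1 then []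
           else (tag, PySem.Str.findFrom s "$" (k : Int),
                 PySem.Str.findFrom s "$" (PySem.Str.findFrom s "$" (k : Int) + 1) + 1)
                :: pvLoopA tag s fuel (PySem.Str.findFrom s "$" (PySem.Str.findFrom s "$" (k : Int) + 1) + 1)) := rfl
    cases hL : (s.toList.findIdxs (· == '$')).filter (fun i => decide (k ≤ i)) with
    | nil =>
      have hfindC : PySem.Chars.findFrom s.toList ['$'] (k : Int) none = -1 := by
        rw [pv_findFrom_eq s.toList k hk, hL]
      rw [hstep]
      simp [hdollar, hfindC, pvPairUp]
    | cons a rest =>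
      have haN : a ∈ s.toList.findIdxs (· == '$') :=
        List.mem_of_mem_filter (by rw [hL]; simp)
      have hal : a < s.toList.length := by
        have := List.lt_add_of_mem_findIdxs a haN; omega
      have hane : ((a : Int)) ≠ -1 := by omega
      have hadv : (s.toList.findIdxs (· == '$')).filter (fun i => decide (a + 1 ≤ i)) = rest :=
        pv_filter_advance (List.pairwise_findIdxs) hL
      have hcast : ((a : Int) + 1) = ((a + 1 : Nat) : Int) := by push_cast; ring
      have hfindC : PySem.Chars.findFrom s.toList ['$'] (k : Int) none = (a : Int) := by
        rw [pv_findFrom_eq s.toList k hk, hL]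
      cases rest with
      | nil =>
        have hfind2C : PySem.Chars.findFrom s.toList ['$'] ((a : Int) + 1) none = -1 := by
          rw [hcast, pv_findFrom_eq s.toList (a + 1) (by omega), hadv]
        rw [hstep]
        simp [hdollar, hfindC, hfind2C, hane, pvPairUp]
      | cons b rest2 =>
        have hbN : b ∈ s.toList.findIdxs (· == '$') :=
          List.mem_of_mem_filter (by rw [hadv]; simp)
        have hbl : b < s.toList.length := by
          have := List.lt_add_of_mem_findIdxs b hbN; omega
        have hbne : ((b : Int)) ≠ -1 := by omega
        have hadv2 : (s.toList.findIdxs (· == '$')).filter (fun i => decide (b + 1 ≤ i)) = rest2 :=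
          pv_filter_advance (List.pairwise_findIdxs) hadv
        have hcast2 : ((b : Int) + 1) = ((b + 1 : Nat) : Int) := by push_cast; ring
        have hfind2C : PySem.Chars.findFrom s.toList ['$'] ((a : Int) + 1) none = (b : Int) := by
          rw [hcast, pv_findFrom_eq s.toList (a + 1) (by omega), hadv]
        have hfuel2 : ((s.toList.findIdxs (· == '$')).filter (fun i => decide (b + 1 ≤ i))).length ≤ 2 * fuel + 1 := by
          rw [hadv2]
          rw [hL] at hfuel; simp at hfuel; omega
        have hih := ih (b + 1) (by omega) hfuel2
        rw [hadv2] at hih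
        rw [hstep]
        simp only [PySem.Str.findFrom_eq, hdollar, hfindC, hfind2C, hane, hbne]
        rw [hcast2, hih]
        simp [pvPairUp]

theorem pv_text_eq (tag : String) (s : String) :
    pvLoopA tag s (s.toList.length + 1) 0
      = (pvPairUp (pvMarkerIdxs s)).map (fun p => (tag, p.1, p.2 + 1)) := by
  have h0 : (s.toList.findIdxs (· == '$')).filter (fun i => decide ((0 : Nat) ≤ i))
      = s.toList.findIdxs (· == '$') :=
    List.filter_eq_self.mpr (fun x _ => by simp)
  have hm : pvMarkerIdxs s = (s.toList.findIdxs (· == '$')).map (fun i => (i : Int)) := by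
    have := pv_markerIdxs_eq s.toList 0
    simpa [pvMarkerIdxs] using this
  have hfuel : ((s.toList.findIdxs (· == '$')).filter (fun i => decide ((0 : Nat) ≤ i))).length
      ≤ 2 * (s.toList.length + 1) + 1 := by
    rw [h0, List.length_findIdxs]
    have := List.countP_le_length (l := s.toList) (p := (· == '$'))
    omega
  have := pv_loop_inv tag s (s.toList.length + 1) 0 (by omega) hfuel
  rw [h0] at this
  simpa [hm] using this

-- ===== VERDICT (by name: the statement is the Claim_ definition above) =====
theorem get_payload_positions_py_spec : Claim_equal_get_payload_positions_py := by
  intro url headers body _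
  unfold Spec_get_payload_positions_py get_payload_positions_py get_payload_positions_py_alt
  rw [pv_text_eq, pv_text_eq]
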